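-- pv_equiv track=rewrite | github.com/HannahHK0622/Advent-of-Code-2024 | 2 Dec.py | check_safety_q2
-- ===== SOURCE A (Python) =====
-- from typing import List
--
-- def find_diff(report: List[int]) -> List[int]:
--     diffs = [0 for number in report[1:]]
--     for i in range(len(report)-1):
--         diffs[i] = report[i] - report[i+1]
--     return diffs
--
-- def check_safety_q1(report: List[int]) -> bool:
--     diffs = find_diff(report)
--     if(all(abs(diff) <= 3 for diff in diffs)): # if each jump is <= 3
--         if(all(diff > 0 for diff in diffs) or all(diff < 0 for diff in diffs)): #If the sign of differences is all the same, and collorarily diff is not 0.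
--             return True
--     return False
--
-- def check_safety_q2(report: List[int]) -> bool:
--     q1_pass: int = check_safety_q1(report)
--     if not q1_pass:
--         problem_dampened_solutions: List[bool] = []
--         for ignored in range(len(report)):
--             problem_dampened_solutions.append(check_safety_q1(report[:ignored] + report[ignored+1:]))
--     if(q1_pass or any(problem_dampened_solutions)):
--         return True
--     return False
-- ===== SOURCE B (Python) =====
-- from typing import List
--
-- def check_safety_q2(report: List[int]) -> bool:
--     # Per direction, scan once for the first bad adjacent pair; only removing one of
--     # its two endpoints can fix that direction, so test at most two candidates.
--     for s in (1, -1):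
--         i = _first_bad(report, s)
--         if i is None:
--             return True
--         for j in (i, i + 1):
--             if _first_bad(report[:j] + report[j+1:], s) is None:
--                 return True
--     return False
--
-- def _first_bad(xs: List[int], s: int):
--     # index of the first adjacent pair that is not a step of 1..3 in direction s
--     for k, (a, b) in enumerate(zip(xs, xs[1:])):
--         d = (b - a) * s
--         if not (0 < d <= 3):
--             return k
--     return None
-- ===== Notes on version B (the rewrite author's own statement) =====
-- stated objective: faster
-- what changed: A re-checks full safety for every one-element removal (quadratic); B scans each direction once for the first bad adjacent pair and tests only the two removal candidates that can fix it, so at most five linear scans.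
import Mathlib
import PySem

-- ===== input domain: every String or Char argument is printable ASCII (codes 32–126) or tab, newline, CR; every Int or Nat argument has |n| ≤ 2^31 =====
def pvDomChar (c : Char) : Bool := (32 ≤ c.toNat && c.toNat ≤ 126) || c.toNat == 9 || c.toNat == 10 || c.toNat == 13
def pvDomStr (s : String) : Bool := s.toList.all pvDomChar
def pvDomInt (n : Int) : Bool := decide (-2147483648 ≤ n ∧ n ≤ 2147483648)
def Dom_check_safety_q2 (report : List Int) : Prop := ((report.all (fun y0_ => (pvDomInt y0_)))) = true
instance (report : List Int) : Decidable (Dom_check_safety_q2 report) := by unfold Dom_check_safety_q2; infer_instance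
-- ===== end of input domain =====

-- B replaces A's quadratic try-every-removal loop by, per direction, a scan for the
-- first bad adjacent pair and at most two removal candidates (objective: faster).


-- ===== PORT A =====
def find_diff (report : List Int) : List Int :=
  let diffs := (PySem.List.slice report (some 1) none).map (fun _ => (0 : Int))
  (PySem.List.pyRange 0 ((report.length : Int) - 1) 1).foldl
    (fun ds i => PySem.List.pySetD ds i
      (PySem.List.pyGetD report i 0 - PySem.List.pyGetD report (i + 1) 0)) diffs

def check_safety_q1 (report : List Int) : Bool :=
  let diffs := find_diff report
  if diffs.all (fun d => decide (|d| ≤ 3)) then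
    if (diffs.all fun d => decide (0 < d)) || (diffs.all fun d => decide (d < 0)) then
      true
    else false
  else false

def check_safety_q2 (report : List Int) : Bool :=
  let q1_pass := check_safety_q1 report
  if !q1_pass then
    let sols := (PySem.List.pyRange 0 (report.length : Int) 1).foldl
      (fun acc i => acc ++ [check_safety_q1
        (PySem.List.slice report none (some i) ++ PySem.List.slice report (some (i + 1)) none)]) []
    if q1_pass || sols.any id then true else false
  else
    if q1_pass then true else false

-- ===== PORT B =====
-- first index k with a bad adjacent pair (xs[k], xs[k+1]) for direction s, else none
def pvFirstBad (s : Int) : List Int → Option Nat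
  | a :: b :: rest =>
      if !(decide (0 < (b - a) * s ∧ (b - a) * s ≤ 3)) then some 0
      else (pvFirstBad s (b :: rest)).map (· + 1)
  | _ => none

def pvTryDir (s : Int) (r : List Int) : Bool :=
  match pvFirstBad s r with
  | none => true
  | some i =>
      (pvFirstBad s (r.take i ++ r.drop (i + 1))).isNone
        || (pvFirstBad s (r.take (i + 1) ++ r.drop (i + 2))).isNone

def check_safety_q2_alt (report : List Int) : Bool :=
  pvTryDir 1 report || pvTryDir (-1) report

-- ===== PRECONDITION & SPEC =====
def Spec_check_safety_q2 (report : List Int) (out : Bool) : Prop := out = check_safety_q2_alt report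
instance (report : List Int) (out : Bool) : Decidable (Spec_check_safety_q2 report out) := by unfold Spec_check_safety_q2; infer_instance

-- ===== CLAIM (what is proved, stated in full; the proofs are below) =====
def Claim_equal_check_safety_q2 : Prop := ∀ (report : List Int), Dom_check_safety_q2 report → Spec_check_safety_q2 report (check_safety_q2 report)

-- ===== LEMMAS AND PROOFS =====

theorem pv_foldl_pySetD (f : Int → Int) :
    ∀ (m : Nat) (init : List Int), m ≤ init.length →
    (PySem.List.pyRange 0 (m : Int) 1).foldl
      (fun ds i => PySem.List.pySetD ds i (f i)) init
    = (List.range m).map (fun (k : Nat) => f (k : Int)) ++ init.drop m := by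
  intro m
  induction m with
  | zero => intro init h; simp
  | succ n ih =>
    intro init h
    have hcast : ((n + 1 : Nat) : Int) = (n : Int) + 1 := by push_cast; ring
    rw [hcast, PySem.List.pyRange_one_succ_right (by positivity),
        List.foldl_append, ih init (by omega)]
    simp only [List.foldl_cons, List.foldl_nil, PySem.List.pySetD_natCast]
    rw [List.set_append_right _ _ (by simp)]
    simp only [List.range_succ, List.map_append, List.append_assoc, List.map_cons, List.map_nil]
    have hd : List.drop n init = init[n]'(by omega) :: List.drop (n + 1) init :=
      List.drop_eq_getElem_cons (by omega)
    simp
    rw [hd, List.set_cons_zero]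

theorem pv_range_map_zip (r : List Int) :
    (List.range (r.length - 1)).map (fun (k : Nat) => r.getD k 0 - r.getD (k + 1) 0)
      = List.zipWith (fun a b => a - b) r r.tail := by
  induction r with
  | nil => simp
  | cons a t ih =>
    cases t with
    | nil => simp
    | cons b t' =>
      have hlen : (a :: b :: t').length - 1 = ((b :: t').length - 1) + 1 := by
        simp
      rw [hlen, List.range_succ_eq_map, List.map_cons, List.map_map]
      have : ((fun (k : Nat) => (a :: b :: t').getD k 0 - (a :: b :: t').getD (k + 1) 0) ∘ (· + 1))
          = (fun (k : Nat) => (b :: t').getD k 0 - (b :: t').getD (k + 1) 0) := by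
        funext k
        simp
      rw [this, ih]
      simp

theorem pv_find_diff_eq (r : List Int) :
    find_diff r = List.zipWith (fun a b => a - b) r r.tail := by
  cases r with
  | nil =>
    simp [find_diff, PySem.List.pyRange_one_eq_nil (show (-1:Int) ≤ 0 by norm_num), PySem.List.slice_from_one]
  | cons a t =>
    unfold find_diff
    have hcast : (((a :: t).length : Int) - 1) = ((t.length : Nat) : Int) := by
      simp
    have hinit : ((PySem.List.slice (a :: t) (some 1) none).map (fun _ => (0 : Int))).length
        = t.length := by
      simp [PySem.List.slice_from_one]
    rw [hcast, pv_foldl_pySetD _ t.length _ (by omega)]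
    rw [List.drop_of_length_le (by omega), List.append_nil]
    have hmap : ∀ k : Nat, k < t.length →
        (PySem.List.pyGetD (a :: t) (k : Int) 0 - PySem.List.pyGetD (a :: t) ((k : Int) + 1) 0)
          = (a :: t).getD k 0 - (a :: t).getD (k + 1) 0 := by
      intro k hk
      have : ((k : Int) + 1) = ((k + 1 : Nat) : Int) := by push_cast; ring
      rw [this, PySem.List.pyGetD_natCast, PySem.List.pyGetD_natCast]
    calc (List.range t.length).map
          (fun (k : Nat) => PySem.List.pyGetD (a :: t) (k : Int) 0 - PySem.List.pyGetD (a :: t) ((k : Int) + 1) 0)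
        = (List.range t.length).map
          (fun (k : Nat) => (a :: t).getD k 0 - (a :: t).getD (k + 1) 0) := by
          apply List.map_congr_left
          intro k hk
          exact hmap k (List.mem_range.mp hk)
      _ = List.zipWith (fun a b => a - b) (a :: t) (a :: t).tail := by
          have := pv_range_map_zip (a :: t)
          simpa using this

theorem pv_firstBad_isNone_cons (s a b : Int) (t : List Int) :
    (pvFirstBad s (a :: b :: t)).isNone
      = (decide (0 < (b - a) * s ∧ (b - a) * s ≤ 3) && (pvFirstBad s (b :: t)).isNone) := by
  by_cases h : (0 < (b - a) * s ∧ (b - a) * s ≤ 3) <;> simp [pvFirstBad, h]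

theorem pv_firstBad_cons_good {s a b : Int} {t : List Int}
    (hp : 0 < (b - a) * s ∧ (b - a) * s ≤ 3) :
    pvFirstBad s (a :: b :: t) = (pvFirstBad s (b :: t)).map (· + 1) := by
  simp [pvFirstBad, hp]

theorem pv_firstBad_cons_bad {s a b : Int} {t : List Int}
    (hp : ¬ (0 < (b - a) * s ∧ (b - a) * s ≤ 3)) :
    pvFirstBad s (a :: b :: t) = some 0 := by
  simp [pvFirstBad, hp]

theorem pv_chain_up (r : List Int) :
    (pvFirstBad 1 r).isNone
      = (List.zipWith (fun a b => a - b) r r.tail).all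
          (fun d => decide (|d| ≤ 3) && decide (d < 0)) := by
  induction r with
  | nil => simp [pvFirstBad]
  | cons a t ih =>
    cases t with
    | nil => simp [pvFirstBad]
    | cons b t' =>
      rw [pv_firstBad_isNone_cons]
      have hhead : decide (0 < (b - a) * 1 ∧ (b - a) * 1 ≤ 3)
          = (decide (|a - b| ≤ 3) && decide (a - b < 0)) := by
        simp only [← Bool.decide_and]
        apply decide_eq_decide.mpr
        rw [mul_one, abs_le]
        omega
      simp only [List.tail_cons, List.zipWith_cons_cons, List.all_cons] at *
      rw [hhead, ih]

theorem pv_chain_down (r : List Int) :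
    (pvFirstBad (-1) r).isNone
      = (List.zipWith (fun a b => a - b) r r.tail).all
          (fun d => decide (|d| ≤ 3) && decide (0 < d)) := by
  induction r with
  | nil => simp [pvFirstBad]
  | cons a t ih =>
    cases t with
    | nil => simp [pvFirstBad]
    | cons b t' =>
      rw [pv_firstBad_isNone_cons]
      have hhead : decide (0 < (b - a) * (-1) ∧ (b - a) * (-1) ≤ 3)
          = (decide (|a - b| ≤ 3) && decide (0 < a - b)) := by
        simp only [← Bool.decide_and]
        apply decide_eq_decide.mpr
        rw [abs_le]
        omega
      simp only [List.tail_cons, List.zipWith_cons_cons, List.all_cons] at *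
      rw [hhead, ih]

theorem pv_all_distrib (l : List Int) (p q w : Int → Bool) :
    (l.all p && (l.all q || l.all w))
      = (l.all (fun d => p d && q d) || l.all (fun d => p d && w d)) := by
  rw [Bool.eq_iff_iff]
  simp only [Bool.and_eq_true, Bool.or_eq_true, List.all_eq_true, Bool.and_eq_true]
  constructor
  · rintro ⟨hp, hq | hw⟩
    · exact Or.inl fun x hx => ⟨hp x hx, hq x hx⟩
    · exact Or.inr fun x hx => ⟨hp x hx, hw x hx⟩
  · rintro (h | h)
    · exact ⟨fun x hx => (h x hx).1, Or.inl fun x hx => (h x hx).2⟩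
    · exact ⟨fun x hx => (h x hx).1, Or.inr fun x hx => (h x hx).2⟩

theorem pv_q1_eq (r : List Int) :
    check_safety_q1 r = ((pvFirstBad 1 r).isNone || (pvFirstBad (-1) r).isNone) := by
  have hq1 : check_safety_q1 r
      = ((find_diff r).all (fun d => decide (|d| ≤ 3))
          && (((find_diff r).all fun d => decide (0 < d))
              || ((find_diff r).all fun d => decide (d < 0)))) := by
    simp only [check_safety_q1]
    by_cases h1 : ((find_diff r).all fun d => decide (|d| ≤ 3)) = true <;>
      by_cases h2 : (((find_diff r).all fun d => decide (0 < d))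
          || (find_diff r).all fun d => decide (d < 0)) = true <;>
      simp [h1, h2]
  rw [hq1, pv_find_diff_eq, pv_all_distrib, pv_chain_up, pv_chain_down, Bool.or_comm]

theorem pv_firstBad_some_lt {s : Int} {r : List Int} {i : Nat}
    (h : pvFirstBad s r = some i) : i + 1 < r.length := by
  induction r generalizing i with
  | nil => simp [pvFirstBad] at h
  | cons a t ih =>
    cases t with
    | nil => simp [pvFirstBad] at h
    | cons b t' =>
      by_cases hp : (0 < (b - a) * s ∧ (b - a) * s ≤ 3)
      · rw [pv_firstBad_cons_good hp, Option.map_eq_some_iff] at h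
        obtain ⟨i', hi', rfl⟩ := h
        have := ih hi'
        simp at this ⊢
        omega
      · rw [pv_firstBad_cons_bad hp] at h
        obtain rfl : (0 : Nat) = i := congrArg (fun o => o.getD 0) h
        simp

theorem pv_firstBad_tail {s a : Int} {l : List Int}
    (h : (pvFirstBad s (a :: l)).isNone = true) : (pvFirstBad s l).isNone = true := by
  cases l with
  | nil => simp [pvFirstBad]
  | cons b t =>
    rw [pv_firstBad_isNone_cons] at h
    exact (Bool.and_eq_true_iff.mp h).2

theorem pv_candidates {s : Int} {r : List Int} {i j : Nat}
    (h : pvFirstBad s r = some i)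
    (hj : (pvFirstBad s (r.eraseIdx j)).isNone = true) : j = i ∨ j = i + 1 := by
  induction r generalizing i j with
  | nil => simp [pvFirstBad] at h
  | cons a t ih =>
    cases t with
    | nil => simp [pvFirstBad] at h
    | cons b t' =>
      by_cases hp : (0 < (b - a) * s ∧ (b - a) * s ≤ 3)
      · -- first pair good: i = i' + 1
        rw [pv_firstBad_cons_good hp, Option.map_eq_some_iff] at h
        obtain ⟨i', hi', rfl⟩ := h
        cases j with
        | zero =>
          -- removing the head leaves b :: t', whose first bad pair persists
          simp only [List.eraseIdx_cons_zero] at hj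
          rw [hi'] at hj
          simp at hj
        | succ j' =>
          simp only [List.eraseIdx_cons_succ] at hj
          have := ih hi' (pv_firstBad_tail hj)
          omega
      · -- first pair bad: i = 0, removing j ≥ 2 keeps the bad pair adjacent
        rw [pv_firstBad_cons_bad hp] at h
        obtain rfl : (0 : Nat) = i := congrArg (fun o => o.getD 0) h
        match j with
        | 0 => exact Or.inl rfl
        | 1 => exact Or.inr rfl
        | (j' + 2) =>
          exfalso
          simp only [List.eraseIdx_cons_succ] at hj
          rw [pv_firstBad_isNone_cons] at hj
          simp [hp] at hj

theorem pv_A_eq (r : List Int) :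
    check_safety_q2 r
      = (check_safety_q1 r
          || (List.range r.length).any (fun k => check_safety_q1 (r.eraseIdx k))) := by
  simp only [check_safety_q2]
  cases hq : check_safety_q1 r with
  | true => simp
  | false =>
    simp only [Bool.not_false, if_true, Bool.false_or]
    rw [PySem.List.foldl_append_singleton_eq_map, PySem.List.pyRange_one, List.map_map]
    simp only [List.nil_append, Int.sub_zero, Int.toNat_natCast]
    rw [Bool.eq_iff_iff]
    simp only [List.any_eq_true, List.mem_map, List.mem_range, id_eq]
    constructor
    · rintro h
      split at h
      case isTrue h' =>
        obtain ⟨x, ⟨k, hk, rfl⟩, hx⟩ := h'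
        refine ⟨k, hk, ?_⟩
        have h1 : PySem.List.slice r none (some ((0 : Int) + (k : Int))) = r.take k := by
          rw [Int.zero_add, PySem.List.slice_to_natCast]
        have h2 : PySem.List.slice r (some ((0 : Int) + (k : Int) + 1)) none = r.drop (k + 1) := by
          rw [show ((0 : Int) + (k : Int) + 1) = ((k + 1 : Nat) : Int) by push_cast; ring,
            PySem.List.slice_from_natCast]
        simp only [Function.comp] at hx
        rw [h1, h2, ← List.eraseIdx_eq_take_drop_succ] at hx
        exact hx
      case isFalse => exact absurd h (by simp)
    · rintro ⟨k, hk, hx⟩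
      have : ∃ x ∈ List.range r.length,
          (check_safety_q1
            (PySem.List.slice r none (some ((0 : Int) + (x : Int))) ++
             PySem.List.slice r (some ((0 : Int) + (x : Int) + 1)) none)) = true := by
        refine ⟨k, List.mem_range.mpr hk, ?_⟩
        rw [Int.zero_add, PySem.List.slice_to_natCast,
          show ((k : Int) + 1) = ((k + 1 : Nat) : Int) by push_cast; ring,
          PySem.List.slice_from_natCast, ← List.eraseIdx_eq_take_drop_succ]
        exact hx
      split
      case isTrue => rfl
      case isFalse h' =>
        exfalso
        apply h'
        obtain ⟨x, hx1, hx2⟩ := this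
        exact ⟨_, ⟨x, List.mem_range.mp hx1, rfl⟩, by simpa [Function.comp] using hx2⟩

theorem pv_main (r : List Int) : check_safety_q2 r = check_safety_q2_alt r := by
  have htd : ∀ (j : Nat), r.take j ++ r.drop (j + 1) = r.eraseIdx j :=
    fun j => (List.eraseIdx_eq_take_drop_succ r j).symm
  rw [pv_A_eq, Bool.eq_iff_iff]
  simp only [check_safety_q2_alt, Bool.or_eq_true, List.any_eq_true, List.mem_range, pv_q1_eq]
  cases h1 : pvFirstBad 1 r with
  | none => simp [pvTryDir, h1]
  | some i1 =>
    cases h2 : pvFirstBad (-1) r with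
    | none => simp [pvTryDir, h2]
    | some i2 =>
      have e1 := pv_firstBad_some_lt h1
      have e2 := pv_firstBad_some_lt h2
      simp only [pvTryDir, h1, h2, Option.isNone_some, Bool.or_eq_true]
      rw [htd i1, htd i2,
        show r.take (i1 + 1) ++ r.drop (i1 + 2) = r.eraseIdx (i1 + 1) by
          rw [List.eraseIdx_eq_take_drop_succ],
        show r.take (i2 + 1) ++ r.drop (i2 + 2) = r.eraseIdx (i2 + 1) by
          rw [List.eraseIdx_eq_take_drop_succ]]
      constructor
      · rintro (habs | ⟨k, hk, hor⟩)
        · simp at habs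
        · rcases hor with hup | hdn
          · rcases pv_candidates h1 hup with rfl | rfl
            · exact Or.inl (Or.inl hup)
            · exact Or.inl (Or.inr hup)
          · rcases pv_candidates h2 hdn with rfl | rfl
            · exact Or.inr (Or.inl hdn)
            · exact Or.inr (Or.inr hdn)
      · rintro ((h | h) | (h | h))
        · exact Or.inr ⟨i1, by omega, Or.inl h⟩
        · exact Or.inr ⟨i1 + 1, by omega, Or.inl h⟩
        · exact Or.inr ⟨i2, by omega, Or.inr h⟩
        · exact Or.inr ⟨i2 + 1, by omega, Or.inr h⟩

-- ===== VERDICT (by name: the statement is the Claim_ definition above) =====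
theorem check_safety_q2_spec : Claim_equal_check_safety_q2 := by
  intro report _
  unfold Spec_check_safety_q2
  exact pv_main report
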